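-- pv_equiv track=rewrite | github.com/TroySigX/winai | global_function.py | data_exist
-- ===== SOURCE A (Python) =====
-- def data_exist(terms, command, search_level = 1):
--     if search_level == 0:
--         for term in terms:
--             if term == command:
--                 return True
--         return False
--
--     command_word = command.split()
--     #check if there is term in terms such that term is a segment in command_word
--     if search_level == 1:
--         for term in terms:
--             if term == '':
--                 return True
--             term_word = term.split()
--             for i in range(len(term_word) - 1, len(command_word)):
--                 ok = True
--                 for j in range(len(term_word)):
--                     if term_word[j] != command_word[i - len(term_word) + 1 + j]:
--                         ok = False
--                         break
--                 if ok:
--                     return True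
--         return False
--
--     #check if there is term in terms such that term is a subsequence in command_word (not neccessarily continuous)
--     if search_level == 2:
--         for term in terms:
--             if term == '':
--                 return True
--             term_word = term.split()
--             pos = 0
--             for x in command_word:
--                 if x == term_word[pos]:
--                     pos += 1
--                     if pos == len(term_word):
--                         return True
--         return False
--
--     #check if there is term in terms such that term is in command
--     if search_level == 3:
--         for term in terms:
--             if term in command:
--                 return True
--         return False
--
--     #check prefix of command_word (0 -> len(term_word) - 1), term_word[i] is a prefix of command_word[i]
--     if search_level == 4:
--         for term in terms:
--             term_word = term.split()
--             if len(term_word) != len(command_word):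
--                 continue
--             ok = True
--             for i in range(len(term_word)):
--                 if len(term_word[i]) > len(command_word[i]):
--                     ok = False
--                     break
--                 if command_word[i][:len(term_word[i])] != term_word[i]:
--                     ok = False
--                     break
--             if ok:
--                 return True
--         return False
--
--     #similar to search level 4, doesn't need to be prefix of command_word, but have to be continuous (segment)
--     if search_level == 5:
--         for term in terms:
--             if term == '':
--                 return True
--             term_word = term.split()
--             for i in range(len(term_word) - 1, len(command_word)):
--                 ok = True
--                 for j in range(len(term_word)):
--                     if len(term_word[j]) > len(command_word[i - len(term_word) + 1 + j]):
--                         ok = False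
--                         break
--
--                     if term_word[j] != command_word[i - len(term_word) + 1 + j][:len(term_word[j])]:
--                         ok = False
--                         break
--                 if ok:
--                     return True
--         return False
--
--     #similar to search level 5, but doesn't need to be continuous (subsequence)
--     if search_level == 6:
--         for term in terms:
--             if term == '':
--                 return True
--             term_word = term.split()
--             pos = 0
--             for x in command_word:
--                 if len(x) >= len(term_word[pos]):
--                     if x[:len(term_word[pos])] == term_word[pos]:
--                         pos += 1
--                         if pos == len(term_word):
--                             return True
--         return False
-- ===== SOURCE B (Python) =====
-- def data_exist(terms, command, search_level=1):
--     if search_level == 0: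
--         return command in terms
--     if search_level == 3:
--         return any(t in command for t in terms)
--     if search_level not in (1, 2, 4, 5, 6):
--         return None
--
--     cw = command.split()
--     pre = search_level >= 4
--
--     def mask(tw, c):
--         # bit k set <=> term word k matches command word c
--         mm = 0
--         for k in range(len(tw)):
--             if (c.startswith(tw[k]) if pre else tw[k] == c):
--                 mm |= 1 << k
--         return mm
--
--     def found(term):
--         # bit-parallel Shift-And: one pass over cw, bitmask of active prefix lengths
--         tw = term.split()
--         n = len(tw)
--         if search_level == 4:
--             # anchored run: bit j set <=> tw[0:j] matched cw[0:j] exactly at the start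
--             s = 1
--             for c in cw:
--                 s = (s & mask(tw, c)) << 1
--             return (s >> n) & 1 == 1
--         if n == 0:
--             return True
--         hi = 1 << (n - 1)
--         persist = search_level in (2, 6)
--         s = 0
--         for c in cw:
--             t = ((s << 1) | 1) & mask(tw, c)
--             s = (s | t) if persist else t
--             if s & hi:
--                 return True
--         return False
--
--     return any(found(t) for t in terms)
-- ===== Notes on version B (the rewrite author's own statement) =====
-- stated objective: alternative
-- what changed: Replaces A's nested index loops (window scan over start positions, pos-counter greedy, per-index prefix checks) with the bit-parallel Shift-And algorithm: per term a single fold over the command words maintains one integer bitmask of active matched-prefix lengths - reseeded each step for segment levels 1/5, accumulated for subsequence levels 2/6, anchored without reseeding for level 4 - and reports a hit when the top bit fires.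
-- outside the precondition, e.g. on data_exist([' '], 'a', 6): A raises IndexError, B returns True; on data_exist([' '], '', 2): A returns False, B returns True; on data_exist(['a', ' '], 'a', 2): A returns True, B returns True
import Mathlib
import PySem

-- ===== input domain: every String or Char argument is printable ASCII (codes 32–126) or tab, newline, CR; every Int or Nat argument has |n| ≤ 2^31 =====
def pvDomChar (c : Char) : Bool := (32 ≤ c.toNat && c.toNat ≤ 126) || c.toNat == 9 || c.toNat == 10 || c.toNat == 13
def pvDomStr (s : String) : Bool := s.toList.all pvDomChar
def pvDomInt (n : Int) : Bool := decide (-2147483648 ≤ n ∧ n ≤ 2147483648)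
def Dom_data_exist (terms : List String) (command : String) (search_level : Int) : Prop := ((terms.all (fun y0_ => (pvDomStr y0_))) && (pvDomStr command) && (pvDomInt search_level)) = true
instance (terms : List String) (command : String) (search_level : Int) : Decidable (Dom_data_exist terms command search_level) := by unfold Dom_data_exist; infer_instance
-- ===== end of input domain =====

-- B replaces A's nested index loops by bit-parallel Shift-And matching: per term one fold over the
-- command words maintains a bitmask of active matched-prefix lengths; objective: alternative, same cost.
-- ===== PORT A =====
-- A's inner segment loop (levels 1 and 5): any end index i, all positions j match under q.
def pvA_segloop (q : String → String → Bool) (tw cw : List String) : Bool :=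
  (PySem.List.pyRange (PySem.List.len tw - 1) (PySem.List.len cw) 1).any fun i =>
    (PySem.List.pyRange 0 (PySem.List.len tw) 1).all fun j =>
      q (PySem.List.pyGetD tw j "") (PySem.List.pyGetD cw (i - PySem.List.len tw + 1 + j) "")

-- A's subsequence loop (levels 2 and 6): scan command words advancing pos on a match under q.
-- (Python raises IndexError here when tw = [] and cw ≠ []; excluded by Pre_, the default "" is never read inside Pre_.)
def pvA_substep (q : String → String → Bool) (tw : List String) (st : Bool × Int) (x : String) : Bool × Int :=
  if st.1 then st
  else if q (PySem.List.pyGetD tw st.2 "") x then (st.2 + 1 == PySem.List.len tw, st.2 + 1)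
  else st

def pvA_subloop (q : String → String → Bool) (tw cw : List String) : Bool :=
  (cw.foldl (pvA_substep q tw) (false, 0)).1

-- A's level-4 body: equal word counts, then every term word a prefix of the command word.
def pvA_l4body (tw cw : List String) : Bool :=
  if PySem.List.len tw != PySem.List.len cw then false
  else (PySem.List.pyRange 0 (PySem.List.len tw) 1).all fun i =>
    !(PySem.Str.len (PySem.List.pyGetD tw i "") > PySem.Str.len (PySem.List.pyGetD cw i "")) &&
    (PySem.Str.slice (PySem.List.pyGetD cw i "") none (some (PySem.Str.len (PySem.List.pyGetD tw i ""))) == PySem.List.pyGetD tw i "")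

def data_exist (terms : List String) (command : String) (search_level : Int) : Bool :=
  if search_level == 0 then
    terms.any fun term => term == command
  else
    let command_word := PySem.Str.split₀ command
    if search_level == 1 then
      terms.any fun term =>
        term == "" || pvA_segloop (fun t c => t == c) (PySem.Str.split₀ term) command_word
    else if search_level == 2 then
      terms.any fun term =>
        term == "" || pvA_subloop (fun t c => c == t) (PySem.Str.split₀ term) command_word
    else if search_level == 3 then
      terms.any fun term => PySem.Str.isIn term command
    else if search_level == 4 then
      terms.any fun term => pvA_l4body (PySem.Str.split₀ term) command_word
    else if search_level == 5 then
      terms.any fun term =>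
        term == "" || pvA_segloop
          (fun t c => !(PySem.Str.len t > PySem.Str.len c) &&
            (PySem.Str.slice c none (some (PySem.Str.len t)) == t))
          (PySem.Str.split₀ term) command_word
    else if search_level == 6 then
      terms.any fun term =>
        term == "" || pvA_subloop
          (fun t c => !(PySem.Str.len t > PySem.Str.len c) &&
            (PySem.Str.slice c none (some (PySem.Str.len t)) == t))
          (PySem.Str.split₀ term) command_word
    else false  -- Python falls through and returns None here; excluded by Pre_

-- ===== PORT B =====
-- match mask for a command word c: bit k set iff term word k matches c
def pvB_mask (pre : Bool) (tw : List String) (c : String) : Nat :=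
  (List.range tw.length).foldl
    (fun mm k =>
      if (if pre then PySem.Str.startswith c (tw.getD k "") else tw.getD k "" == c)
      then mm ||| (1 <<< k) else mm) 0

-- level 4: anchored run, no reseeding; bit j after i steps means tw[0:j] matched cw[0:j] with j = i
def pvB_run4 (pre : Bool) (tw cw : List String) : Bool :=
  let s := cw.foldl (fun s c => (s &&& pvB_mask pre tw c) <<< 1) 1
  ((s >>> tw.length) &&& 1) == 1

-- Shift-And scan over the command words: reseed each step (segment) or accumulate (subsequence)
def pvB_scan (pre persist : Bool) (tw : List String) (hi : Nat) : Nat → List String → Bool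
  | _, [] => false
  | s, c :: cs =>
    let t := ((s <<< 1) ||| 1) &&& pvB_mask pre tw c
    let s' := if persist then s ||| t else t
    if s' &&& hi != 0 then true else pvB_scan pre persist tw hi s' cs

def data_exist_alt (terms : List String) (command : String) (search_level : Int) : Bool :=
  if search_level == 0 then terms.contains command
  else if search_level == 3 then terms.any fun t => PySem.Str.isIn t command
  else if search_level == 1 || search_level == 2 || search_level == 4 ||
          search_level == 5 || search_level == 6 then
    let cw := PySem.Str.split₀ command
    let pre := decide (4 ≤ search_level)
    terms.any fun term =>
      let tw := PySem.Str.split₀ term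
      if search_level == 4 then pvB_run4 pre tw cw
      else if tw.length == 0 then true
      else pvB_scan pre (search_level == 2 || search_level == 6) tw (1 <<< (tw.length - 1)) 0 cw
  else false

-- ===== PRECONDITION & SPEC =====
-- Pre_ excludes search levels outside 0..6 (A falls through and returns None, not a bool) and, at the
-- subsequence levels 2 and 6, any term that is nonempty but whitespace-only: on those A's indexing
-- term_word[pos] into the empty word list raises IndexError when the command has words, and A's False
-- when the command is empty (where '' gives True) is an accident of the same indexing path.
def Pre_data_exist (terms : List String) (command : String) (search_level : Int) : Prop :=
  (0 ≤ search_level ∧ search_level ≤ 6) ∧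
  ((search_level = 2 ∨ search_level = 6) →
    ∀ t ∈ terms, t ≠ "" → PySem.Str.split₀ t ≠ [])
instance (terms : List String) (command : String) (search_level : Int) : Decidable (Pre_data_exist terms command search_level) := by unfold Pre_data_exist; infer_instance

def pvWitness_data_exist : List String × String × Int := (["foo bar", "b"], "a foo bar", 1)

def Spec_data_exist (terms : List String) (command : String) (search_level : Int) (out : Bool) : Prop := out = data_exist_alt terms command search_level
instance (terms : List String) (command : String) (search_level : Int) (out : Bool) : Decidable (Spec_data_exist terms command search_level out) := by unfold Spec_data_exist; infer_instance

-- ===== CLAIM (what is proved, stated in full; the proofs are below) =====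
def Claim_equal_data_exist : Prop := ∀ (terms : List String) (command : String) (search_level : Int), Dom_data_exist terms command search_level → Pre_data_exist terms command search_level → Spec_data_exist terms command search_level (data_exist terms command search_level)

-- ===== LEMMAS AND PROOFS =====

def pvB_m (pre : Bool) (t c : String) : Bool :=
  if pre then PySem.Str.startswith c t else t == c
def pvSegStep (pre : Bool) (tw : List String) (s : Nat) (c : String) : Nat :=
  ((s <<< 1) ||| 1) &&& pvB_mask pre tw c
def pvB_seg (m : String → String → Bool) (tw cw : List String) : Bool :=
  if cw.length < tw.length then false
  else (List.range (cw.length - tw.length + 1)).any fun i =>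
    (tw.zip (cw.drop i)).all fun p => m p.1 p.2

def pvB_exact (m : String → String → Bool) (tw cw : List String) : Bool :=
  (tw.length == cw.length) && ((tw.zip cw).all fun p => m p.1 p.2)

theorem pv_testBit_one (i : Nat) : (1 : Nat).testBit i = decide (i = 0) := by
  have := Nat.testBit_two_pow_sub_one 1 i
  simpa [eq_comm, Nat.lt_one_iff] using this

theorem pv_orfold_testBit (q : Nat → Bool) :
    ∀ (l : List Nat) (acc : Nat) (j : Nat),
    (l.foldl (fun mm k => if q k then mm ||| (1 <<< k) else mm) acc).testBit j
      = (acc.testBit j || (l.contains j && q j)) := by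
  intro l
  induction l with
  | nil => intro acc j; simp
  | cons k ks ih =>
    intro acc j
    rw [List.foldl_cons, ih]
    by_cases hk : q k = true
    · rw [if_pos hk]
      rw [Nat.testBit_or, Nat.testBit_shiftLeft, pv_testBit_one]
      rcases eq_or_ne j k with rfl | hjk
      · simp [hk]
      · have h1 : (decide (j ≥ k) && decide (j - k = 0)) = false := by
          by_cases h : j ≥ k <;> simp [h] <;> omega
        rw [h1]
        simp [hjk]
    · rw [if_neg hk]
      rcases eq_or_ne j k with rfl | hjk
      · simp [hk]
      · simp [hjk, Ne.symm hjk]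

theorem pv_mask_testBit (pre : Bool) (tw : List String) (c : String) (k : Nat) :
    (pvB_mask pre tw c).testBit k
      = (decide (k < tw.length) && pvB_m pre (tw.getD k "") c) := by
  unfold pvB_mask
  rw [show (fun mm j => if (if pre then PySem.Str.startswith c (tw.getD j "") else tw.getD j "" == c) then mm ||| (1 <<< j) else mm)
      = (fun mm j => if pvB_m pre (tw.getD j "") c then mm ||| (1 <<< j) else mm) from rfl]
  rw [pv_orfold_testBit]
  simp [List.contains_iff_mem]

theorem pv_t_testBit (pre : Bool) (tw : List String) (c : String) (s : Nat) (j : Nat) :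
    (pvSegStep pre tw s c).testBit j
      = ((decide (j = 0) || (decide (1 ≤ j) && s.testBit (j - 1)))
          && decide (j < tw.length) && pvB_m pre (tw.getD j "") c) := by
  unfold pvSegStep
  rw [Nat.testBit_and, Nat.testBit_or, Nat.testBit_shiftLeft, pv_testBit_one,
    pv_mask_testBit]
  rcases Nat.eq_zero_or_pos j with rfl | hj
  · simp
  · have h0 : (decide (j = 0)) = false := by simp; omega
    have h1 : (decide (j ≥ 1)) = true := by simp; omega
    rw [h0, h1]
    simp [Bool.and_assoc]

theorem pv_hi_fire (x n : Nat) : (x &&& (1 <<< n) != 0) = x.testBit n := by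
  rw [Nat.shiftLeft_eq, one_mul, Nat.and_two_pow]
  cases h : x.testBit n
  · simp [h]
  · simp only [h, Bool.toNat_true, one_mul, bne_iff_ne, ne_eq]
    simp [Nat.pow_eq_zero]

theorem pv_sub_state_step (pre : Bool) (tw : List String) (c : String) (p : Nat)
    (hp : p < tw.length) :
    ((2 ^ p - 1) ||| pvSegStep pre tw (2 ^ p - 1) c)
      = if pvB_m pre (tw.getD p "") c then 2 ^ (p + 1) - 1 else 2 ^ p - 1 := by
  apply Nat.eq_of_testBit_eq
  intro j
  rw [Nat.testBit_or, pv_t_testBit]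
  by_cases hm : pvB_m pre (tw.getD p "") c = true
  · rw [if_pos hm]
    simp only [Nat.testBit_two_pow_sub_one]
    rw [Bool.eq_iff_iff]
    simp only [Bool.or_eq_true, Bool.and_eq_true, decide_eq_true_eq]
    constructor
    · rintro (h | ⟨⟨h0 | ⟨h1, h2⟩, hlt⟩, _⟩) <;> omega
    · intro h
      rcases Nat.lt_or_ge j p with h2 | h2
      · left; omega
      · right
        have hjp : j = p := by omega
        subst hjp
        exact ⟨⟨by omega, hp⟩, hm⟩
  · rw [if_neg hm]
    simp only [Nat.testBit_two_pow_sub_one]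
    rw [Bool.eq_iff_iff]
    simp only [Bool.or_eq_true, Bool.and_eq_true, decide_eq_true_eq]
    constructor
    · rintro (h | ⟨⟨h0 | ⟨h1, h2⟩, hlt⟩, hmj⟩)
      · omega
      · rcases eq_or_ne j p with rfl | hne
        · exact absurd hmj hm
        · omega
      · rcases eq_or_ne j p with rfl | hne
        · exact absurd hmj hm
        · omega
    · intro h; left; omega

theorem pv_sub_sticky (q : String → String → Bool) (tw : List String) :
    ∀ (cw : List String) (i : Int), (cw.foldl (pvA_substep q tw) (true, i)).1 = true := by
  intro cw
  induction cw with
  | nil => intro i; rfl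
  | cons c cs ih => intro i; rw [List.foldl_cons, show pvA_substep q tw (true, i) c = (true, i) from rfl]; exact ih i

theorem pv_scan_sub_inv (pre : Bool) (tw : List String) :
    ∀ (cw : List String) (p : Nat), p < tw.length →
    pvB_scan pre true tw (1 <<< (tw.length - 1)) (2 ^ p - 1) cw
      = (cw.foldl (pvA_substep (pvB_m pre) tw) (false, (p : Int))).1 := by
  intro cw
  induction cw with
  | nil => intro p hp; rfl
  | cons c cs ih =>
    intro p hp
    rw [List.foldl_cons]
    have hstep : pvA_substep (pvB_m pre) tw (false, (p : Int)) c
        = if pvB_m pre (tw.getD p "") c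
          then (((p : Int) + 1 == PySem.List.len tw), (p : Int) + 1)
          else (false, (p : Int)) := by
      unfold pvA_substep
      rw [if_neg (by simp)]
      rw [show PySem.List.pyGetD tw ((p : Nat) : Int) "" = tw.getD p "" from
        PySem.List.pyGetD_natCast tw p ""]
    have hscan : pvB_scan pre true tw (1 <<< (tw.length - 1)) (2 ^ p - 1) (c :: cs)
        = (if ((2 ^ p - 1) ||| pvSegStep pre tw (2 ^ p - 1) c) &&& (1 <<< (tw.length - 1)) != 0
           then true
           else pvB_scan pre true tw (1 <<< (tw.length - 1))
             ((2 ^ p - 1) ||| pvSegStep pre tw (2 ^ p - 1) c) cs) := rfl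
    rw [hscan, pv_sub_state_step pre tw c p hp, hstep]
    by_cases hm : pvB_m pre (tw.getD p "") c = true
    · rw [if_pos hm, if_pos hm]
      by_cases hE : p + 1 = tw.length
      · have hfire : ((2 ^ (p + 1) - 1) &&& (1 <<< (tw.length - 1)) != 0) = true := by
          rw [pv_hi_fire, Nat.testBit_two_pow_sub_one]
          simp; omega
        rw [hfire, if_pos rfl]
        have hb : ((p : Int) + 1 == PySem.List.len tw) = true := by
          rw [PySem.List.len_eq]; simp; omega
        rw [hb, pv_sub_sticky]
      · have hfire : ((2 ^ (p + 1) - 1) &&& (1 <<< (tw.length - 1)) != 0) = false := by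
          rw [pv_hi_fire, Nat.testBit_two_pow_sub_one]
          simp; omega
        rw [hfire, if_neg (by simp)]
        have hb : ((p : Int) + 1 == PySem.List.len tw) = false := by
          rw [PySem.List.len_eq]; simp; omega
        rw [hb, show (p : Int) + 1 = ((p + 1 : Nat) : Int) from by push_cast; ring]
        exact ih (p + 1) (by omega)
    · rw [if_neg hm, if_neg hm]
      have hfire : ((2 ^ p - 1) &&& (1 <<< (tw.length - 1)) != 0) = false := by
        rw [pv_hi_fire, Nat.testBit_two_pow_sub_one]
        simp; omega
      rw [hfire, if_neg (by simp)]
      exact ih p hp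

theorem pv_scan_sub_eq (pre : Bool) (tw cw : List String) (hne : tw ≠ []) :
    pvB_scan pre true tw (1 <<< (tw.length - 1)) 0 cw = pvA_subloop (pvB_m pre) tw cw := by
  unfold pvA_subloop
  have h0 : 0 < tw.length := List.length_pos_iff.mpr hne
  have := pv_scan_sub_inv pre tw cw 0 h0
  simpa using this

theorem pv_scan_seg_fire (pre : Bool) (tw : List String) (hi : Nat) :
    ∀ (cw : List String) (s : Nat),
    pvB_scan pre false tw hi s cw
      = (List.range cw.length).any fun i =>
          ((cw.take (i + 1)).foldl (pvSegStep pre tw) s) &&& hi != 0 := by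
  intro cw
  induction cw with
  | nil => intro s; rfl
  | cons c cs ih =>
    intro s
    have hscan : pvB_scan pre false tw hi s (c :: cs)
        = (if (pvSegStep pre tw s c) &&& hi != 0
           then true
           else pvB_scan pre false tw hi (pvSegStep pre tw s c) cs) := rfl
    rw [hscan]
    rw [List.length_cons, List.range_succ_eq_map, List.any_cons, List.any_map]
    have h0 : ((c :: cs).take (0 + 1)).foldl (pvSegStep pre tw) s = pvSegStep pre tw s c := rfl
    rw [h0]
    by_cases hf : ((pvSegStep pre tw s c) &&& hi != 0) = true
    · rw [if_pos hf, hf, Bool.true_or]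
    · rw [if_neg hf, show ((pvSegStep pre tw s c) &&& hi != 0) = false from by simpa using hf,
        Bool.false_or]
      rw [ih (pvSegStep pre tw s c)]
      refine List.any_congr rfl fun i => ?_
      simp only [Function.comp_def]
      rfl

theorem pv_getD_append_last (l : List String) (c d : String) : (l ++ [c]).getD l.length d = c := by
  rw [List.getD_eq_getElem?_getD, List.getElem?_append_right (le_refl _)]
  simp

theorem pv_seg_state (pre : Bool) (tw : List String) :
    ∀ (cw : List String) (k : Nat),
    ((cw.foldl (pvSegStep pre tw) 0).testBit k)
      = (decide (k < tw.length) && decide (k + 1 ≤ cw.length)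
         && ((List.range (k + 1)).all fun j =>
               pvB_m pre (tw.getD j "") (cw.getD (cw.length - (k + 1) + j) ""))) := by
  intro cw
  induction cw using List.reverseRecOn with
  | nil => intro k; simp
  | append_singleton done c ih =>
    intro k
    rw [List.foldl_append, List.foldl_cons, List.foldl_nil, pv_t_testBit]
    rw [Bool.eq_iff_iff]
    simp only [Bool.and_eq_true, Bool.or_eq_true, decide_eq_true_eq, List.all_eq_true,
      List.mem_range, List.length_append, List.length_singleton]
    constructor
    · rintro ⟨⟨h0 | ⟨h1, hbit⟩, hkn⟩, hmc⟩
      · subst h0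
        refine ⟨⟨hkn, by omega⟩, ?_⟩
        intro j hj
        have hj0 : j = 0 := by omega
        subst hj0
        rw [show done.length + 1 - (0 + 1) + 0 = done.length from by omega,
          pv_getD_append_last]
        exact hmc
      · rw [ih (k - 1)] at hbit
        simp only [Bool.and_eq_true, decide_eq_true_eq, List.all_eq_true, List.mem_range] at hbit
        obtain ⟨⟨hk1n, hk1L⟩, hall⟩ := hbit
        refine ⟨⟨hkn, by omega⟩, ?_⟩
        intro j hj
        rcases Nat.lt_or_ge j k with hjk | hjk
        · have idx : done.length + 1 - (k + 1) + j = done.length - (k - 1 + 1) + j := by omega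
          rw [idx, List.getD_append _ _ _ _ (by omega)]
          exact hall j (by omega)
        · have hjk' : j = k := by omega
          subst hjk'
          rw [show done.length + 1 - (j + 1) + j = done.length from by omega,
            pv_getD_append_last]
          exact hmc
    · rintro ⟨⟨hkn, hkL⟩, hall⟩
      have hmc : pvB_m pre (tw.getD k "") c = true := by
        have := hall k (by omega)
        rwa [show done.length + 1 - (k + 1) + k = done.length from by omega,
          pv_getD_append_last] at this
      refine ⟨⟨?_, hkn⟩, hmc⟩
      rcases Nat.eq_zero_or_pos k with rfl | hk
      · exact Or.inl rfl
      · refine Or.inr ⟨hk, ?_⟩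
        rw [ih (k - 1)]
        simp only [Bool.and_eq_true, decide_eq_true_eq, List.all_eq_true, List.mem_range]
        refine ⟨⟨by omega, by omega⟩, ?_⟩
        intro j hj
        have := hall j (by omega)
        rwa [show done.length + 1 - (k + 1) + j = done.length - (k - 1 + 1) + j from by omega,
          List.getD_append _ _ _ _ (by omega)] at this

theorem pv_getD_take (l : List String) (t m : Nat) (h : m < t) (d : String) :
    (l.take t).getD m d = l.getD m d := by
  rw [List.getD_eq_getElem?_getD, List.getD_eq_getElem?_getD]
  congr 1
  exact List.getElem?_take_of_lt h

theorem pv_zipwin (q : String → String → Bool) :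
    ∀ (tw : List String) (j : Nat) (cw : List String), j + tw.length ≤ cw.length →
    ((List.range tw.length).all fun j' => q (tw.getD j' "") (cw.getD (j + j') "")) =
      ((tw.zip (cw.drop j)).all fun p => q p.1 p.2) := by
  intro tw
  induction tw with
  | nil => intro j cw h; simp
  | cons t ts ih =>
    intro j cw h
    have hlen : j + (ts.length + 1) ≤ cw.length := by simpa using h
    have hj : j < cw.length := by omega
    rw [List.drop_eq_getElem_cons hj]
    simp only [List.length_cons, List.range_succ_eq_map, List.all_cons, List.all_map,
      List.zip_cons_cons, Function.comp_def, List.getD_cons_zero, List.getD_cons_succ,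
      Nat.add_zero]
    congr 1
    · congr 1
      simp [List.getD_eq_getElem?_getD, List.getElem?_eq_getElem hj]
    · rw [← ih (j + 1) cw (by omega)]
      refine List.all_congr rfl fun j' => ?_
      rw [show j + (j' + 1) = (j + 1) + j' from by omega]

theorem pv_scan_seg_eq (pre : Bool) (tw cw : List String) (hne : tw ≠ []) :
    pvB_scan pre false tw (1 <<< (tw.length - 1)) 0 cw = pvB_seg (pvB_m pre) tw cw := by
  have hn : 0 < tw.length := List.length_pos_iff.mpr hne
  rw [pv_scan_seg_fire]
  have hany : ((List.range cw.length).any fun i =>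
      ((cw.take (i + 1)).foldl (pvSegStep pre tw) 0) &&& (1 <<< (tw.length - 1)) != 0)
      = ((List.range cw.length).any fun i =>
          decide (tw.length ≤ i + 1) &&
          ((List.range tw.length).all fun j =>
            pvB_m pre (tw.getD j "") (cw.getD (i + 1 - tw.length + j) ""))) := by
    refine PySem.List.any_congr_mem (fun i hi => ?_)
    have hilt : i < cw.length := List.mem_range.mp hi
    rw [pv_hi_fire, pv_seg_state]
    have hlen : (cw.take (i + 1)).length = i + 1 := by
      rw [List.length_take]; omega
    rw [hlen, show tw.length - 1 + 1 = tw.length from by omega]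
    rw [Bool.eq_iff_iff]
    simp only [Bool.and_eq_true, decide_eq_true_eq, List.all_eq_true, List.mem_range]
    constructor
    · rintro ⟨⟨_, hle⟩, hall⟩
      refine ⟨hle, fun j hj => ?_⟩
      rw [← pv_getD_take cw (i + 1) (i + 1 - tw.length + j) (by omega)]
      exact hall j hj
    · rintro ⟨hle, hall⟩
      refine ⟨⟨by omega, hle⟩, fun j hj => ?_⟩
      rw [pv_getD_take cw (i + 1) (i + 1 - tw.length + j) (by omega)]
      exact hall j hj
  rw [hany]
  unfold pvB_seg
  by_cases hlt : cw.length < tw.length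
  · rw [if_pos hlt]
    apply List.any_eq_false.mpr
    intro i hi
    have hilt : i < cw.length := List.mem_range.mp hi
    rw [show (decide (tw.length ≤ i + 1)) = false from by simp; omega, Bool.false_and]
    simp
  · rw [if_neg hlt]
    have hle : tw.length ≤ cw.length := Nat.not_lt.mp hlt
    rw [PySem.List.any_congr_mem (fun i0 hi0 =>
      (pv_zipwin (pvB_m pre) tw i0 cw (by
        have := List.mem_range.mp hi0; omega)).symm)]
    rw [Bool.eq_iff_iff]
    simp only [List.any_eq_true, List.mem_range, Bool.and_eq_true, decide_eq_true_eq,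
      List.all_eq_true]
    constructor
    · rintro ⟨i, hi, hile, hall⟩
      refine ⟨i + 1 - tw.length, by omega, fun j hj => ?_⟩
      have := hall j hj
      rwa [show i + 1 - tw.length + j = i + 1 - tw.length + j from rfl] at this
    · rintro ⟨i0, hi0, hall⟩
      refine ⟨i0 + tw.length - 1, by omega, by omega, fun j hj => ?_⟩
      have := hall j hj
      rwa [show i0 + tw.length - 1 + 1 - tw.length + j = i0 + j from by omega]

theorem pv_run4_zero (pre : Bool) (tw : List String) (cw : List String) :
    cw.foldl (fun s c => (s &&& pvB_mask pre tw c) <<< 1) 0 = 0 := by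
  induction cw with
  | nil => rfl
  | cons c cs ih =>
    rw [List.foldl_cons, Nat.zero_and, Nat.zero_shiftLeft]
    exact ih

theorem pv_run4_char (pre : Bool) (tw : List String) :
    ∀ (cw : List String) (i : Nat), i ≤ tw.length →
    cw.foldl (fun s c => (s &&& pvB_mask pre tw c) <<< 1) (2 ^ i)
      = if (i + cw.length ≤ tw.length ∧
            ∀ j, j < cw.length → pvB_m pre (tw.getD (i + j) "") (cw.getD j "") = true)
        then 2 ^ (i + cw.length) else 0 := by
  intro cw
  induction cw with
  | nil =>
    intro i hi
    rw [List.foldl_nil, if_pos ⟨by simpa using hi, fun j hj => absurd hj (by simp)⟩]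
    simp
  | cons c cs ih =>
    intro i hi
    rw [List.foldl_cons]
    have hmm : (2 ^ i &&& pvB_mask pre tw c)
        = ((pvB_mask pre tw c).testBit i).toNat * 2 ^ i := by
      rw [Nat.land_comm, Nat.and_two_pow]
    by_cases hm : (decide (i < tw.length) && pvB_m pre (tw.getD i "") c) = true
    · have hin : i < tw.length := by simp at hm; exact hm.1
      have hmc : pvB_m pre (tw.getD i "") c = true := by simp at hm; exact hm.2
      have hstep : (2 ^ i &&& pvB_mask pre tw c) <<< 1 = 2 ^ (i + 1) := by
        rw [hmm, pv_mask_testBit, hm, Bool.toNat_true, one_mul, Nat.shiftLeft_eq, pow_one,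
          ← pow_succ]
      rw [hstep, ih (i + 1) (by omega)]
      simp only [List.length_cons]
      refine if_congr ?_ (by rw [show i + 1 + cs.length = i + (cs.length + 1) from by omega]) rfl
      constructor
      · rintro ⟨hlen, hall⟩
        refine ⟨by omega, fun j hj => ?_⟩
        cases j with
        | zero => simpa using hmc
        | succ j' =>
          rw [List.getD_cons_succ, show i + (j' + 1) = i + 1 + j' from by omega]
          exact hall j' (by omega)
      · rintro ⟨hlen, hall⟩
        refine ⟨by omega, fun j hj => ?_⟩
        have := hall (j + 1) (by omega)
        rwa [List.getD_cons_succ, show i + (j + 1) = i + 1 + j from by omega] at this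
    · have hstep : (2 ^ i &&& pvB_mask pre tw c) <<< 1 = 0 := by
        rw [hmm, pv_mask_testBit,
          show ((decide (i < tw.length) && pvB_m pre (tw.getD i "") c)) = false from by
            simpa using hm]
        simp
      rw [hstep, pv_run4_zero]
      refine (if_neg ?_).symm
      rintro ⟨hlen, hall⟩
      have h0 := hall 0 (by simp)
      simp only [Nat.add_zero, List.getD_cons_zero] at h0
      have hin : i < tw.length := by simp at hlen; omega
      exact hm (by rw [decide_eq_true hin, Bool.true_and]; exact h0)

theorem pv_run4_eq (pre : Bool) (tw cw : List String) :
    pvB_run4 pre tw cw = pvB_exact (pvB_m pre) tw cw := by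
  have hchar := pv_run4_char pre tw cw 0 (Nat.zero_le _)
  rw [pow_zero] at hchar
  simp only [pvB_run4, hchar, Nat.zero_add]
  have hzip := pv_zipwin (pvB_m pre) tw 0 cw
  by_cases hc : (cw.length ≤ tw.length ∧
      ∀ j, j < cw.length → pvB_m pre (tw.getD j "") (cw.getD j "") = true)
  · rw [if_pos hc]
    by_cases hL : tw.length = cw.length
    · have h1 : (2 ^ cw.length >>> tw.length) &&& 1 = 1 := by
        rw [hL, Nat.shiftRight_eq_div_pow, Nat.div_self (Nat.two_pow_pos _)]
        rfl
      rw [h1]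
      have hz := hzip (by omega)
      rw [List.drop_zero] at hz
      unfold pvB_exact
      rw [show ((tw.length == cw.length)) = true from by simp [hL], Bool.true_and, ← hz]
      rw [show ((1 : Nat) == 1) = true from rfl]
      symm
      apply List.all_eq_true.mpr
      intro j hj
      have hjlt : j < tw.length := List.mem_range.mp hj
      simpa using hc.2 j (by omega)
    · have h1 : (2 ^ cw.length >>> tw.length) &&& 1 = 0 := by
        rw [Nat.shiftRight_eq_div_pow,
          Nat.div_eq_of_lt (Nat.pow_lt_pow_right (by omega) (by omega))]
        simp
      rw [h1]
      unfold pvB_exact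
      rw [show ((tw.length == cw.length)) = false from by simp [hL], Bool.false_and]
      rfl
  · rw [if_neg hc]
    rw [show ((0 : Nat) >>> tw.length) &&& 1 = 0 from by simp]
    symm
    rw [show ((0 : Nat) == 1) = false from rfl]
    apply Bool.eq_false_iff.mpr
    intro h
    unfold pvB_exact at h
    simp only [Bool.and_eq_true, beq_iff_eq] at h
    obtain ⟨hL, hall⟩ := h
    apply hc
    refine ⟨by omega, fun j hj => ?_⟩
    have hz := hzip (by omega)
    rw [List.drop_zero] at hz
    rw [← hz] at hall
    simpa using List.all_eq_true.mp hall j (List.mem_range.mpr (by omega))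

theorem pv_segloop_eq (q : String → String → Bool) (tw cw : List String) :
    pvA_segloop q tw cw = pvB_seg q tw cw := by
  unfold pvA_segloop pvB_seg
  rw [PySem.List.len_eq, PySem.List.len_eq, PySem.List.pyRange_one, List.any_map]
  by_cases hlt : cw.length < tw.length
  · have h0 : (((cw.length : Int)) - ((tw.length : Int) - 1)).toNat = 0 := by omega
    rw [h0]
    simp [hlt]
  · have hle : tw.length ≤ cw.length := Nat.not_lt.mp hlt
    have hcnt : (((cw.length : Int)) - ((tw.length : Int) - 1)).toNat = cw.length - tw.length + 1 := by
      omega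
    rw [hcnt, if_neg hlt]
    refine PySem.List.any_congr_mem (fun j hj => ?_)
    have hjlt : j < cw.length - tw.length + 1 := List.mem_range.mp hj
    simp only [Function.comp_def, PySem.List.pyRange_one, List.all_map]
    rw [show (((tw.length : Int)) - 0).toNat = tw.length from by omega]
    rw [← pv_zipwin q tw j cw (by omega)]
    refine List.all_congr rfl fun j' => ?_
    rw [show ((0 : Int) + (j' : Int)) = ((j' : Nat) : Int) from by omega]
    rw [show ((tw.length : Int) - 1 + (j : Int) - (tw.length : Int) + 1 + ((j' : Nat) : Int)) = ((j + j' : Nat) : Int) from by push_cast; ring]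
    rw [PySem.List.pyGetD_natCast, PySem.List.pyGetD_natCast]

theorem pvB_seg_nil (m : String → String → Bool) (cw : List String) :
    pvB_seg m [] cw = true := by
  unfold pvB_seg
  rw [if_neg (by simp)]
  apply List.any_eq_true.mpr
  exact ⟨0, List.mem_range.mpr (by omega), by simp⟩

-- A's per-word test "len(t) <= len(c) and c[:len(t)] == t" IS startswith
theorem pv_prefix_pred_eq (t c : String) :
    (!(PySem.Str.len t > PySem.Str.len c) &&
      (PySem.Str.slice c none (some (PySem.Str.len t)) == t)) = PySem.Str.startswith c t := by
  rw [Bool.eq_iff_iff]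
  simp only [Bool.and_eq_true, Bool.not_eq_true', decide_eq_false_iff_not, gt_iff_lt, not_lt,
    beq_iff_eq, PySem.Str.len_eq]
  rw [show (PySem.Str.startswith c t = true) ↔ t.toList <+: c.toList from by
    simp [PySem.Chars.startswith_iff]]
  constructor
  · rintro ⟨hlen, heq⟩
    have h2 : (PySem.Str.slice c none (some ((t.toList.length : Int)))).toList = t.toList := by
      rw [heq]
    rw [PySem.Str.toList_slice, PySem.Chars.slice_eq_listSlice, PySem.List.slice_to_natCast] at h2
    exact List.prefix_iff_eq_take.mpr h2.symm
  · intro hpre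
    refine ⟨by exact_mod_cast hpre.length_le, ?_⟩
    apply String.toList_inj.mp
    rw [PySem.Str.toList_slice, PySem.Chars.slice_eq_listSlice, PySem.List.slice_to_natCast]
    exact (List.prefix_iff_eq_take.mp hpre).symm

theorem pv_predEq1 : (fun t c : String => t == c) = pvB_m false := by
  funext t c; simp [pvB_m]

theorem pv_predEq2 : (fun t c : String => c == t) = pvB_m false := by
  funext t c
  have hm : pvB_m false t c = (t == c) := by simp [pvB_m]
  rw [hm, Bool.eq_iff_iff]
  simp only [beq_iff_eq]
  exact eq_comm

theorem pv_predEq5 : (fun t c : String => !(PySem.Str.len t > PySem.Str.len c) &&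
    (PySem.Str.slice c none (some (PySem.Str.len t)) == t)) = pvB_m true := by
  funext t c
  rw [pv_prefix_pred_eq t c]
  simp [pvB_m]

theorem pv_split_empty : PySem.Str.split₀ "" = [] := rfl

theorem pv_l4_eq (tw cw : List String) : pvA_l4body tw cw = pvB_exact (pvB_m true) tw cw := by
  unfold pvA_l4body pvB_exact
  rw [PySem.List.len_eq, PySem.List.len_eq]
  by_cases hbn : (((tw.length : Int)) != ((cw.length : Int))) = true
  · have hne : tw.length ≠ cw.length := by simpa using hbn
    rw [if_pos hbn, show ((tw.length == cw.length)) = false from by simp [hne], Bool.false_and]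
  · have hlen : tw.length = cw.length := by simpa using hbn
    rw [if_neg hbn, show ((tw.length == cw.length)) = true from by simp [hlen], Bool.true_and]
    rw [PySem.List.pyRange_one, List.all_map]
    rw [show (((tw.length : Int)) - 0).toNat = tw.length from by omega]
    have hz := pv_zipwin (pvB_m true) tw 0 cw (by omega)
    rw [List.drop_zero] at hz
    rw [← hz]
    refine List.all_congr rfl fun i => ?_
    simp only [Function.comp_def]
    rw [show ((0 : Int) + (i : Int)) = ((i : Nat) : Int) from by omega]
    rw [PySem.List.pyGetD_natCast, PySem.List.pyGetD_natCast,
      pv_prefix_pred_eq (tw.getD i "") (cw.getD i "")]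
    rw [show (0 + i : Nat) = i from by omega]
    simp [pvB_m]

-- ===== VERDICT (by name: the statement is the Claim_ definition above) =====
theorem data_exist_spec : Claim_equal_data_exist := by
  intro terms command lvl _hdom hpre
  obtain ⟨⟨h0, h6⟩, hws⟩ := hpre
  unfold Spec_data_exist data_exist data_exist_alt
  interval_cases lvl
  · -- level 0
    show (terms.any fun term => term == command) = terms.contains command
    exact List.any_beq'
  · -- level 1
    show (terms.any fun term =>
        term == "" || pvA_segloop (fun t c => t == c)
          (PySem.Str.split₀ term) (PySem.Str.split₀ command)) =
      (terms.any fun term =>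
        if (PySem.Str.split₀ term).length == 0 then true
        else pvB_scan false false (PySem.Str.split₀ term)
          (1 <<< ((PySem.Str.split₀ term).length - 1)) 0 (PySem.Str.split₀ command))
    refine List.any_congr rfl fun term => ?_
    by_cases htw : (PySem.Str.split₀ term).length = 0
    · simp only [htw]
      rw [pv_segloop_eq, List.length_eq_zero_iff.mp htw, pvB_seg_nil, Bool.or_true]
      rfl
    · have hne : PySem.Str.split₀ term ≠ [] := by
        intro h; exact htw (by rw [h]; rfl)
      have hts : term ≠ "" := by
        intro h; rw [h, pv_split_empty] at hne; exact hne rfl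
      rw [show ((PySem.Str.split₀ term).length == 0) = false from by simp [htw],
        if_neg Bool.false_ne_true]
      rw [show (term == "") = false from by simp [hts], Bool.false_or, pv_predEq1,
        pv_segloop_eq, ← pv_scan_seg_eq false (PySem.Str.split₀ term) (PySem.Str.split₀ command) hne]
  · -- level 2
    show (terms.any fun term =>
        term == "" || pvA_subloop (fun t c => c == t)
          (PySem.Str.split₀ term) (PySem.Str.split₀ command)) =
      (terms.any fun term =>
        if (PySem.Str.split₀ term).length == 0 then true
        else pvB_scan false true (PySem.Str.split₀ term)
          (1 <<< ((PySem.Str.split₀ term).length - 1)) 0 (PySem.Str.split₀ command))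
    refine PySem.List.any_congr_mem (fun term hterm => ?_)
    by_cases htw : (PySem.Str.split₀ term).length = 0
    · simp only [htw]
      have hts : term = "" := by
        by_contra h
        exact (hws (Or.inl rfl) term hterm h) (List.length_eq_zero_iff.mp htw)
      rw [show (term == "") = true from by simp [hts], Bool.true_or]
      rfl
    · have hne : PySem.Str.split₀ term ≠ [] := by
        intro h; exact htw (by rw [h]; rfl)
      have hts : term ≠ "" := by
        intro h; rw [h, pv_split_empty] at hne; exact hne rfl
      rw [show ((PySem.Str.split₀ term).length == 0) = false from by simp [htw],
        if_neg Bool.false_ne_true]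
      rw [show (term == "") = false from by simp [hts], Bool.false_or, pv_predEq2,
        pv_scan_sub_eq false (PySem.Str.split₀ term) (PySem.Str.split₀ command) hne]
  · -- level 3
    show (terms.any fun term => PySem.Str.isIn term command) =
      (terms.any fun t => PySem.Str.isIn t command)
    rfl
  · -- level 4
    show (terms.any fun term => pvA_l4body (PySem.Str.split₀ term) (PySem.Str.split₀ command)) =
      (terms.any fun term => pvB_run4 true (PySem.Str.split₀ term) (PySem.Str.split₀ command))
    refine List.any_congr rfl fun term => ?_
    rw [pv_l4_eq, pv_run4_eq]
  · -- level 5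
    show (terms.any fun term =>
        term == "" || pvA_segloop
          (fun t c => !(PySem.Str.len t > PySem.Str.len c) &&
            (PySem.Str.slice c none (some (PySem.Str.len t)) == t))
          (PySem.Str.split₀ term) (PySem.Str.split₀ command)) =
      (terms.any fun term =>
        if (PySem.Str.split₀ term).length == 0 then true
        else pvB_scan true false (PySem.Str.split₀ term)
          (1 <<< ((PySem.Str.split₀ term).length - 1)) 0 (PySem.Str.split₀ command))
    refine List.any_congr rfl fun term => ?_
    by_cases htw : (PySem.Str.split₀ term).length = 0
    · simp only [htw]
      rw [pv_segloop_eq, List.length_eq_zero_iff.mp htw, pvB_seg_nil, Bool.or_true]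
      rfl
    · have hne : PySem.Str.split₀ term ≠ [] := by
        intro h; exact htw (by rw [h]; rfl)
      have hts : term ≠ "" := by
        intro h; rw [h, pv_split_empty] at hne; exact hne rfl
      rw [show ((PySem.Str.split₀ term).length == 0) = false from by simp [htw],
        if_neg Bool.false_ne_true]
      rw [show (term == "") = false from by simp [hts], Bool.false_or, pv_predEq5,
        pv_segloop_eq, ← pv_scan_seg_eq true (PySem.Str.split₀ term) (PySem.Str.split₀ command) hne]
  · -- level 6
    show (terms.any fun term =>
        term == "" || pvA_subloop
          (fun t c => !(PySem.Str.len t > PySem.Str.len c) &&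
            (PySem.Str.slice c none (some (PySem.Str.len t)) == t))
          (PySem.Str.split₀ term) (PySem.Str.split₀ command)) =
      (terms.any fun term =>
        if (PySem.Str.split₀ term).length == 0 then true
        else pvB_scan true true (PySem.Str.split₀ term)
          (1 <<< ((PySem.Str.split₀ term).length - 1)) 0 (PySem.Str.split₀ command))
    refine PySem.List.any_congr_mem (fun term hterm => ?_)
    by_cases htw : (PySem.Str.split₀ term).length = 0
    · simp only [htw]
      have hts : term = "" := by
        by_contra h
        exact (hws (Or.inr rfl) term hterm h) (List.length_eq_zero_iff.mp htw)
      rw [show (term == "") = true from by simp [hts], Bool.true_or]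
      rfl
    · have hne : PySem.Str.split₀ term ≠ [] := by
        intro h; exact htw (by rw [h]; rfl)
      have hts : term ≠ "" := by
        intro h; rw [h, pv_split_empty] at hne; exact hne rfl
      rw [show ((PySem.Str.split₀ term).length == 0) = false from by simp [htw],
        if_neg Bool.false_ne_true]
      rw [show (term == "") = false from by simp [hts], Bool.false_or, pv_predEq5,
        pv_scan_sub_eq true (PySem.Str.split₀ term) (PySem.Str.split₀ command) hne]
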